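-- pv_equiv track=rewrite | github.com/OleJBondahl/PySchemaElectrical | src/pyschemaelectrical/utils/export_utils.py | _build_prefix_groups
-- ===== SOURCE A (Python) =====
-- def _build_prefix_groups(
--     rows: list[list[str]], terminal_tags: set[str]
-- ) -> dict[str, dict[str, str]]:
--     """Build a mapping of tag -> prefix -> group number for prefixed pins."""
--     prefix_groups: dict[str, dict[str, str]] = {}
--     for row in rows:
--         tag = row[2]
--         if tag not in terminal_tags or ":" not in row[3]:
--             continue
--         prefix = row[3].rsplit(":", 1)[0]
--         tag_groups = prefix_groups.setdefault(tag, {})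
--         if prefix not in tag_groups:
--             tag_groups[prefix] = str(len(tag_groups) + 1)
--     return prefix_groups
-- ===== SOURCE B (Python) =====
-- def _build_prefix_groups(rows, terminal_tags):
--     """Per-tag nested passes: find the qualifying rows once, list the tags in
--     first-appearance order, then for each tag rescan the qualifying rows to
--     collect its ordered-unique prefixes and number them."""
--     qualifying = [row for row in rows if row[2] in terminal_tags and ":" in row[3]]
--     tags = list(dict.fromkeys(row[2] for row in qualifying))
--     return {
--         tag: {
--             prefix: str(i + 1)
--             for i, prefix in enumerate(
--                 dict.fromkeys(
--                     row[3].rsplit(":", 1)[0]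
--                     for row in qualifying
--                     if row[2] == tag
--                 )
--             )
--         }
--         for tag in tags
--     }
-- ===== Notes on version B (the rewrite author's own statement) =====
-- stated objective: alternative
-- what changed: A builds the nested tag->prefix->number dict incrementally in one pass, mutating a setdefault'd inner dict and numbering from its running size; B keeps no grouping accumulator at all: it filters the qualifying rows, lists the distinct tags, and for each tag RESCANS the qualifying rows to collect its ordered-unique prefixes, numbering them by enumeration.
-- outside the precondition, e.g. on _build_prefix_groups([['a', 'b', 'T']], {'T'}): A raises IndexError, B raises IndexError; on _build_prefix_groups([['a', 'b']], set()): A raises IndexError, B raises IndexError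
import Mathlib
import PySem

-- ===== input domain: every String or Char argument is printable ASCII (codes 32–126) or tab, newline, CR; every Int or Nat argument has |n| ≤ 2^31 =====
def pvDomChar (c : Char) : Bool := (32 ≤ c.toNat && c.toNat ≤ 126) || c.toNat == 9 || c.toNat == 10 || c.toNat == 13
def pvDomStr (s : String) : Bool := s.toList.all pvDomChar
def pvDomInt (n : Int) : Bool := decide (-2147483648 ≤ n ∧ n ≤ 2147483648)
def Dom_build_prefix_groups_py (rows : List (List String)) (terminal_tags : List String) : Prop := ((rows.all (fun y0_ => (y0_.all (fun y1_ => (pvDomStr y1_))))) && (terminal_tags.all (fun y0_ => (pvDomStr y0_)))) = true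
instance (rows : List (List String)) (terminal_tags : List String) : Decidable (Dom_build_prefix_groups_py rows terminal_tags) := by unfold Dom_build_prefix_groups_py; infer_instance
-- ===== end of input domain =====

-- B replaces A's incremental one-pass nested-dict mutation with per-tag nested passes:
-- filter the qualifying rows, list the distinct tags, rescan per tag for its
-- ordered-unique prefixes, number by enumeration (objective: alternative).

-- ===== PORT A =====
-- shared primitive emulation: s.rsplit(":", 1)[0] — exact whenever ":" occurs in s
-- (both ports use it only under that guard)
def rsplitColonHead (s : String) : String :=
  String.ofList (s.toList.take (PySem.Chars.rfind s.toList [':']).toNat)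

-- the body of A's 'for row in rows' loop
def stepA (terminal_tags : List String)
    (pg : PySem.Dict String (PySem.Dict String String)) (row : List String) :
    PySem.Dict String (PySem.Dict String String) :=
  match PySem.List.pyGet? row 2 with
  | none => pg                                -- IndexError: outside Pre_
  | some tag =>
    if terminal_tags.contains tag = false then pg
    else
      match PySem.List.pyGet? row 3 with
      | none => pg                            -- IndexError: outside Pre_
      | some s =>
        if PySem.Str.isIn ":" s = false then pg
        else
          let pfx := rsplitColonHead s
          let tag_groups := (PySem.Dict.get? pg tag).getD PySem.Dict.empty
          let tag_groups' :=
            if PySem.Dict.contains tag_groups pfx then tag_groups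
            else PySem.Dict.insert tag_groups pfx
                   (PySem.Int.toStr ((PySem.Dict.size tag_groups : Int) + 1))
          PySem.Dict.insert pg tag tag_groups'

def build_prefix_groups_py (rows : List (List String)) (terminal_tags : List String) :
    List (String × List (String × String)) :=
  (rows.foldl (stepA terminal_tags) PySem.Dict.empty).items.map (fun p => (p.1, p.2.items))

-- ===== PORT B =====
-- B's row filter: row[2] in terminal_tags and ":" in row[3]
def qualB (terminal_tags : List String) (row : List String) : Bool :=
  match PySem.List.pyGet? row 2 with
  | none => false                             -- IndexError: outside Pre_
  | some tag =>
    terminal_tags.contains tag &&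
      (match PySem.List.pyGet? row 3 with
       | none => false                        -- IndexError: outside Pre_
       | some s => PySem.Str.isIn ":" s)

-- row[2] / the prefix of row[3] — only used on rows passing qualB
def tagOf (row : List String) : String := (PySem.List.pyGet? row 2).getD ""
def pfxOf (row : List String) : String := rsplitColonHead ((PySem.List.pyGet? row 3).getD "")

-- {p: str(i+1) for i, p in enumerate(ps)}
def numberPrefixes (ps : List String) : List (String × String) :=
  (PySem.List.enumerate ps).map (fun ip => (ip.2, PySem.Int.toStr (ip.1 + 1)))

def build_prefix_groups_py_alt (rows : List (List String)) (terminal_tags : List String) :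
    List (String × List (String × String)) :=
  let qualifying := rows.filter (qualB terminal_tags)
  let tags := PySem.List.dedup (qualifying.map tagOf)
  tags.map (fun tag =>
    (tag, numberPrefixes
            (PySem.List.dedup
              ((qualifying.filter (fun r => tagOf r == tag)).map pfxOf))))

-- ===== PRECONDITION & SPEC =====
-- Pre_ excludes exactly the inputs on which the Python A raises IndexError:
-- a row shorter than 3 (row[2]), or shorter than 4 while its tag is in terminal_tags (row[3]).
def Pre_build_prefix_groups_py (rows : List (List String)) (terminal_tags : List String) : Prop :=
  ∀ row ∈ rows, 3 ≤ row.length ∧ (row.getD 2 "" ∈ terminal_tags → 4 ≤ row.length)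
instance (rows : List (List String)) (terminal_tags : List String) : Decidable (Pre_build_prefix_groups_py rows terminal_tags) := by unfold Pre_build_prefix_groups_py; infer_instance

def pvWitness_build_prefix_groups_py : List (List String) × List String :=
  ([["0", "1", "T1", "A:1"], ["0", "1", "T1", "B:2"]], ["T1", "T2"])

def Spec_build_prefix_groups_py (rows : List (List String)) (terminal_tags : List String) (out : List (String × List (String × String))) : Prop := out = build_prefix_groups_py_alt rows terminal_tags
instance (rows : List (List String)) (terminal_tags : List String) (out : List (String × List (String × String))) : Decidable (Spec_build_prefix_groups_py rows terminal_tags out) := by unfold Spec_build_prefix_groups_py; infer_instance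

-- ===== CLAIM (what is proved, stated in full; the proofs are below) =====
def Claim_equal_build_prefix_groups_py : Prop := ∀ (rows : List (List String)) (terminal_tags : List String), Dom_build_prefix_groups_py rows terminal_tags → Pre_build_prefix_groups_py rows terminal_tags → Spec_build_prefix_groups_py rows terminal_tags (build_prefix_groups_py rows terminal_tags)

-- ===== LEMMAS AND PROOFS =====

-- proof-internal: the (tag, prefix) pair a row contributes to A's loop (none = filtered)
def extractP (terminal_tags : List String) (row : List String) : Option (String × String) :=
  if qualB terminal_tags row then some (tagOf row, pfxOf row) else none

-- proof-internal: A's grouping effect on the pair level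
def stepB (g : PySem.Dict String (List String)) (tp : String × String) :
    PySem.Dict String (List String) :=
  let ps := (PySem.Dict.get? g tp.1).getD []
  PySem.Dict.insert g tp.1 (if tp.2 ∈ ps then ps else ps ++ [tp.2])

def stepBF (terminal_tags : List String) (g : PySem.Dict String (List String))
    (row : List String) : PySem.Dict String (List String) :=
  match extractP terminal_tags row with
  | some b => stepB g b
  | none => g

-- abstraction: the pair-level grouping state, viewed as A's nested-dict state
def mapVal (g : PySem.Dict String (List String)) : PySem.Dict String (PySem.Dict String String) :=
  PySem.Dict.mk (g.items.map (fun p => (p.1, PySem.Dict.mk (numberPrefixes p.2))))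

lemma get?_mapVal (g : PySem.Dict String (List String)) (x : String) :
    (mapVal g).get? x = (g.get? x).map (fun ps => PySem.Dict.mk (numberPrefixes ps)) := by
  obtain ⟨l⟩ := g
  induction l with
  | nil => rfl
  | cons p rest ih =>
    obtain ⟨k, v⟩ := p
    simp only [mapVal, List.map_cons] at *
    rw [PySem.Dict.get?_mk_cons, PySem.Dict.get?_mk_cons]
    by_cases h : (k == x) = true
    · simp [h]
    · simp only [h, Bool.false_eq_true]
      exact ih

lemma contains_mapVal (g : PySem.Dict String (List String)) (x : String) :
    (mapVal g).contains x = g.contains x := by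
  rw [PySem.Dict.contains_eq_isSome_get?, PySem.Dict.contains_eq_isSome_get?, get?_mapVal]
  cases g.get? x <;> rfl

lemma mapVal_insert (g : PySem.Dict String (List String)) (k : String) (ps : List String) :
    mapVal (g.insert k ps) = (mapVal g).insert k (PySem.Dict.mk (numberPrefixes ps)) := by
  apply PySem.Dict.ext
  rw [show (mapVal (g.insert k ps)).items
        = (g.insert k ps).items.map (fun p => (p.1, PySem.Dict.mk (numberPrefixes p.2))) from rfl,
      PySem.Dict.items_insert, PySem.Dict.items_insert, contains_mapVal]
  by_cases h : g.contains k = true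
  · simp only [h, if_true]
    rw [show (mapVal g).items = g.items.map (fun p => (p.1, PySem.Dict.mk (numberPrefixes p.2))) from rfl]
    rw [List.map_map, List.map_map]
    apply List.map_congr_left
    rintro ⟨a, b⟩ _
    by_cases hak : a = k <;> simp [hak]
  · simp only [h]
    rw [show (mapVal g).items = g.items.map (fun p => (p.1, PySem.Dict.mk (numberPrefixes p.2))) from rfl]
    simp

lemma numberPrefixes_append (ps : List String) (p : String) :
    numberPrefixes (ps ++ [p])
      = numberPrefixes ps ++ [(p, PySem.Int.toStr ((ps.length : Int) + 1))] := by
  unfold numberPrefixes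
  rw [PySem.List.enumerate_append]
  simp [PySem.List.enumerate, add_comm]

lemma keys_mk_numberPrefixes (ps : List String) :
    (PySem.Dict.mk (numberPrefixes ps)).keys = ps := by
  have h1 : (PySem.Dict.mk (numberPrefixes ps)).keys = (numberPrefixes ps).map (·.1) := by
    simp [PySem.Dict.keys]
  rw [h1]
  unfold numberPrefixes
  rw [List.map_map]
  exact PySem.List.map_snd_enumerate ps 0

lemma contains_mk_numberPrefixes (ps : List String) (p : String) :
    (PySem.Dict.mk (numberPrefixes ps)).contains p = decide (p ∈ ps) := by
  rw [PySem.Dict.contains_eq_decide_mem_keys, keys_mk_numberPrefixes]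

lemma size_mk_numberPrefixes (ps : List String) :
    PySem.Dict.size (PySem.Dict.mk (numberPrefixes ps)) = ps.length := by
  have h : PySem.Dict.size (PySem.Dict.mk (numberPrefixes ps)) = (numberPrefixes ps).length := rfl
  rw [h]
  unfold numberPrefixes
  rw [List.length_map, PySem.List.length_enumerate]

-- one row of A's loop, on an abstracted state, is one pair-level step
lemma step_commutes (terminal_tags : List String)
    (g : PySem.Dict String (List String)) (row : List String) :
    stepA terminal_tags (mapVal g) row = mapVal (stepBF terminal_tags g row) := by
  unfold stepA stepBF extractP stepB qualB tagOf pfxOf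
  cases h2 : PySem.List.pyGet? row 2 with
  | none => simp
  | some tag =>
    by_cases ht : terminal_tags.contains tag = true
    · cases h3 : PySem.List.pyGet? row 3 with
      | none => simp
      | some s =>
        by_cases hc : PySem.Str.isIn ":" s = true
        · simp only [ht, hc, Bool.true_eq_false, if_false, if_true, Bool.true_and,
            Option.getD_some]
          set p := rsplitColonHead s with hp
          have hps : ((PySem.Dict.get? (mapVal g) tag).getD PySem.Dict.empty)
              = PySem.Dict.mk (numberPrefixes ((PySem.Dict.get? g tag).getD [])) := by
            rw [get?_mapVal]
            cases PySem.Dict.get? g tag <;> rfl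
          set ps := (PySem.Dict.get? g tag).getD [] with hps0
          rw [mapVal_insert]
          congr 1
          rw [hps, contains_mk_numberPrefixes]
          by_cases hm : p ∈ ps
          · simp [hm]
          · simp only [hm, decide_false, Bool.false_eq_true, if_false]
            rw [size_mk_numberPrefixes, numberPrefixes_append]
            apply PySem.Dict.ext
            rw [PySem.Dict.items_insert_of_not_contains]
            rw [contains_mk_numberPrefixes]
            simp [hm]
        · have ht2 : tag ∈ terminal_tags := by simpa using ht
          have hc' : PySem.Chars.isIn [':'] s.toList = false := by
            rw [show PySem.Chars.isIn [':'] s.toList = PySem.Str.isIn ":" s from rfl]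
            simpa using hc
          simp [ht2, hc']
    · have ht' : tag ∉ terminal_tags := by simpa using ht
      cases PySem.List.pyGet? row 3 <;> simp [ht']

-- the whole loops agree under the abstraction
lemma foldl_commutes (terminal_tags : List String) (rows : List (List String))
    (g : PySem.Dict String (List String)) :
    rows.foldl (stepA terminal_tags) (mapVal g)
      = mapVal (rows.foldl (stepBF terminal_tags) g) := by
  induction rows generalizing g with
  | nil => rfl
  | cons row rest ih =>
    rw [List.foldl_cons, List.foldl_cons, step_commutes terminal_tags g row]
    exact ih _

-- the pair-level loop runs over the filtered rows' (tag, prefix) pairs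
lemma foldl_stepBF_eq (terminal_tags : List String) (rows : List (List String))
    (g : PySem.Dict String (List String)) :
    rows.foldl (stepBF terminal_tags) g
      = ((rows.filter (qualB terminal_tags)).map (fun r => (tagOf r, pfxOf r))).foldl stepB g := by
  induction rows generalizing g with
  | nil => rfl
  | cons row rest ih =>
    rw [List.foldl_cons]
    by_cases h : qualB terminal_tags row = true
    · rw [List.filter_cons_of_pos h, List.map_cons, List.foldl_cons]
      rw [show stepBF terminal_tags g row = stepB g (tagOf row, pfxOf row) by
        unfold stepBF extractP; rw [if_pos h]]
      exact ih _
    · rw [List.filter_cons_of_neg (by simpa using h)]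
      rw [show stepBF terminal_tags g row = g by
        unfold stepBF extractP; rw [if_neg h]]
      exact ih _

-- PySem dedup of an appended element
lemma dedup_append_singleton {α : Type} [BEq α] [LawfulBEq α] (l : List α) (a : α) :
    PySem.List.dedup (l ++ [a])
      = if a ∈ l then PySem.List.dedup l else PySem.List.dedup l ++ [a] := by
  rw [PySem.List.dedup_eq_ofList, PySem.List.dedup_eq_ofList,
      PySem.Set.ofList_eq_foldl, PySem.Set.ofList_eq_foldl, List.foldl_append]
  simp only [List.foldl_cons, List.foldl_nil]
  rw [show PySem.Set.add (List.foldl PySem.Set.add [] l) a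
        = if (List.foldl PySem.Set.add [] l).contains a then List.foldl PySem.Set.add [] l
          else List.foldl PySem.Set.add [] l ++ [a] from rfl]
  have hm : (List.foldl PySem.Set.add [] l).contains a = decide (a ∈ l) := by
    rw [← PySem.Set.ofList_eq_foldl]
    by_cases h : a ∈ l
    · simp [h, (PySem.Set.mem_ofList l a).mpr h]
    · have : a ∉ PySem.Set.ofList l := fun hh => h ((PySem.Set.mem_ofList l a).mp hh)
      simp [h, this]
  rw [hm]
  by_cases h : a ∈ l <;> simp [h]

lemma stepB_def (d : PySem.Dict String (List String)) (t p : String) :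
    stepB d (t, p) = d.insert t
      (if p ∈ (d.get? t).getD [] then (d.get? t).getD [] else (d.get? t).getD [] ++ [p]) := rfl

-- characterization of the pair-level fold: per-key ordered-unique grouping
lemma foldl_stepB_items (L : List (String × String)) :
    (L.foldl stepB PySem.Dict.empty).items
      = (PySem.List.dedup (L.map Prod.fst)).map
          (fun t => (t, PySem.List.dedup ((L.filter (fun p => p.1 == t)).map Prod.snd))) := by
  induction L using List.reverseRecOn with
  | nil => rfl
  | append_singleton L x ih =>
    obtain ⟨t, p⟩ := x
    rw [List.foldl_append, List.foldl_cons, List.foldl_nil]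
    have hkeys : (L.foldl stepB PySem.Dict.empty).keys
        = PySem.List.dedup (L.map Prod.fst) := by
      have h1 : (L.foldl stepB PySem.Dict.empty).keys
          = (L.foldl stepB PySem.Dict.empty).items.map (·.1) := by
        simp [PySem.Dict.keys]
      have hid : ((fun x : String × List String => x.1) ∘
          (fun t => (t, PySem.List.dedup ((L.filter (fun p => p.1 == t)).map Prod.snd))))
          = fun t => t := rfl
      rw [h1, ih, List.map_map, hid, List.map_id']
    have hnodup : (L.foldl stepB PySem.Dict.empty).keys.Nodup := by
      rw [hkeys, PySem.List.dedup_eq_ofList]; exact PySem.Set.nodup_ofList _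
    have hmapfst : PySem.List.dedup ((L ++ [(t, p)]).map Prod.fst)
        = if t ∈ L.map Prod.fst then PySem.List.dedup (L.map Prod.fst)
          else PySem.List.dedup (L.map Prod.fst) ++ [t] := by
      rw [List.map_append]; exact dedup_append_singleton _ _
    by_cases hmem : t ∈ L.map Prod.fst
    · -- key already present: in-place replacement of its entry
      have hcont : (L.foldl stepB PySem.Dict.empty).contains t = true := by
        rw [PySem.Dict.contains_eq_decide_mem_keys, hkeys]
        simp only [decide_eq_true_eq]
        exact (PySem.List.mem_dedup _ _).mpr hmem
      have hget : (L.foldl stepB PySem.Dict.empty).get? t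
          = some (PySem.List.dedup ((L.filter (fun q => q.1 == t)).map Prod.snd)) := by
        apply PySem.Dict.get?_of_mem_items _ _ hnodup
        rw [ih]
        exact List.mem_map_of_mem ((PySem.List.mem_dedup _ _).mpr hmem)
      have hstep : stepB (L.foldl stepB PySem.Dict.empty) (t, p)
          = (L.foldl stepB PySem.Dict.empty).insert t
              (if p ∈ PySem.List.dedup ((L.filter (fun q => q.1 == t)).map Prod.snd) then
                 PySem.List.dedup ((L.filter (fun q => q.1 == t)).map Prod.snd)
               else PySem.List.dedup ((L.filter (fun q => q.1 == t)).map Prod.snd) ++ [p]) := by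
        rw [stepB_def, hget]
        rfl
      rw [hstep, PySem.Dict.items_insert_of_contains _ _ hcont, ih, hmapfst, if_pos hmem,
          List.map_map]
      apply List.map_congr_left
      intro t' ht'
      have ht'mem : t' ∈ L.map Prod.fst := (PySem.List.mem_dedup _ _).mp ht'
      by_cases heq : t' = t
      · subst heq
        simp only [Function.comp_apply, beq_self_eq_true, if_pos]
        have hfilter : (L ++ [(t', p)]).filter (fun q => q.1 == t')
            = L.filter (fun q => q.1 == t') ++ [(t', p)] := by
          rw [List.filter_append]; simp
        rw [hfilter, List.map_append, List.map_cons, List.map_nil,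
            dedup_append_singleton]
        set ps := PySem.List.dedup ((L.filter (fun q => q.1 == t')).map Prod.snd) with hps
        by_cases hp : p ∈ (L.filter (fun q => q.1 == t')).map Prod.snd
        · have hp2 : p ∈ ps := (PySem.List.mem_dedup _ _).mpr hp
          simp [hp, hp2]
        · have hp2 : p ∉ ps := fun hh => hp ((PySem.List.mem_dedup _ _).mp hh)
          simp [hp, hp2]
      · have hne : ¬ (t' == t) = true := by simpa using heq
        simp only [Function.comp_apply, hne, if_neg, Bool.false_eq_true, not_false_iff]
        have hfilter : (L ++ [(t, p)]).filter (fun q => q.1 == t')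
            = L.filter (fun q => q.1 == t') := by
          rw [List.filter_append]
          have : ¬ ((t, p).1 == t') = true := by
            simpa using fun hh => heq (hh.symm)
          simp [this]
        rw [hfilter]
    · -- fresh key: appended at the end with its singleton prefix list
      have hcont : (L.foldl stepB PySem.Dict.empty).contains t = false := by
        rw [PySem.Dict.contains_eq_decide_mem_keys, hkeys]
        simp only [decide_eq_false_iff_not]
        exact fun hh => hmem ((PySem.List.mem_dedup _ _).mp hh)
      have hget : (L.foldl stepB PySem.Dict.empty).get? t = none :=
        (PySem.Dict.get?_eq_none_iff_contains _ _).mpr hcont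
      have hfilterL : L.filter (fun q => q.1 == t) = [] := by
        rw [List.filter_eq_nil_iff]
        rintro ⟨a, b⟩ hab
        simp only [beq_iff_eq]
        intro hh; exact hmem (hh ▸ List.mem_map_of_mem hab)
      have hstep : stepB (L.foldl stepB PySem.Dict.empty) (t, p)
          = (L.foldl stepB PySem.Dict.empty).insert t [p] := by
        rw [stepB_def, hget]
        simp
      rw [hstep, PySem.Dict.items_insert_of_not_contains _ _ hcont, ih, hmapfst, if_neg hmem,
          List.map_append, List.map_cons, List.map_nil]
      congr 1
      · apply List.map_congr_left
        intro t' ht'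
        have ht'mem : t' ∈ L.map Prod.fst := (PySem.List.mem_dedup _ _).mp ht'
        have heq : t' ≠ t := fun hh => hmem (hh ▸ ht'mem)
        have hfilter : (L ++ [(t, p)]).filter (fun q => q.1 == t')
            = L.filter (fun q => q.1 == t') := by
          rw [List.filter_append]
          have : ¬ ((t, p).1 == t') = true := by
            simpa using fun hh => heq (hh.symm)
          simp [this]
        rw [hfilter]
      · have hfilter : (L ++ [(t, p)]).filter (fun q => q.1 == t)
            = [(t, p)] := by
          rw [List.filter_append, hfilterL]; simp
        rw [hfilter]
        rfl

-- ===== VERDICT (by name: the statement is the Claim_ definition above) =====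
theorem build_prefix_groups_py_spec : Claim_equal_build_prefix_groups_py := by
  intro rows terminal_tags _ _
  unfold Spec_build_prefix_groups_py build_prefix_groups_py build_prefix_groups_py_alt
  have h0 : (PySem.Dict.empty : PySem.Dict String (PySem.Dict String String))
      = mapVal PySem.Dict.empty := rfl
  rw [h0, foldl_commutes, foldl_stepBF_eq]
  rw [show ∀ G, (mapVal G).items = G.items.map (fun p => (p.1, PySem.Dict.mk (numberPrefixes p.2))) from fun _ => rfl]
  rw [foldl_stepB_items, List.map_map, List.map_map, List.map_map]
  apply List.map_congr_left
  intro t _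
  simp only [Function.comp_apply]
  congr 1
  rw [List.filter_map, List.map_map]
  rfl
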